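-- pv_equiv track=rewrite | github.com/BravoMG/thesis_begeleider_tool.py | thesis_begeleider_tool.py | genereer_stappenplan
-- ===== SOURCE A (Python) =====
-- from typing import Dict, List, Tuple
--
-- def genereer_stappenplan(alle_feedback: List[str]) -> List[str]:
--     """Genereer actiestappen op basis van feedback."""
--     stappen = []
--
--     if any("mist" in f for f in alle_feedback):
--         stappen.append("📌 Stap 1: Voeg ontbrekende elementen toe aan titelblad")
--
--     if any("methodologie mist" in f for f in alle_feedback):
--         stappen.append("📌 Stap 2: Beschrijf onderzoeksdesign, steekproef, instrument, procedure en analyse")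
--
--     if any("APA" in f for f in alle_feedback):
--         stappen.append("📌 Stap 3: Formatteer referenties volgens APA 7e editie (Poelmans & Severijnen, 2022)")
--
--     if any("AI-logboek" in f or "transparantie" in f for f in alle_feedback):
--         stappen.append("📌 Stap 4: Lever AI-logboek aan volgens REBO template (verplicht!)")
--         stappen.append("   - Gebruik template in 'examples/ai_logboek_voorbeeld.txt'")
--
--     if any("AI-signaal" in f for f in alle_feedback):
--         stappen.append("📌 Stap 5: Herschrijf passages in eigen woorden en voeg persoonlijke reflectie toe")
--
--     if any("reflectie op AI" in f for f in alle_feedback):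
--         stappen.append("📌 Stap 6: Voeg reflectie op AI-gebruik toe in discussie/conclusie (VUB 2023 beveelt aan)")
--
--     if any("Kop" in f for f in alle_feedback):
--         stappen.append("📌 Stap 7: Controleer kopstijlen (Kop 1 voor hoofdstukken, Kop 2 voor paragrafen)")
--
--     if any("zandlopermodel" in f.lower() for f in alle_feedback):
--         stappen.append("📌 Stap 8: Pas het zandlopermodel toe - inleiding van breed naar specifiek")
--
--     if any("objectief" in f.lower() for f in alle_feedback):
--         stappen.append("📌 Stap 9: Vermijd waardeoordelen en subjectieve kwalificaties")
--
--     if any("figuur" in f.lower() or "tabel" in f.lower() for f in alle_feedback):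
--         stappen.append("📌 Stap 10: Controleer of alle figuren/tabellen een bijschrift/bovenschrift hebben")
--
--     if not stappen:
--         stappen.append("✅ Geen correcties nodig. Volgende stap: indienen voor eindbeoordeling.")
--
--     return stappen
-- ===== SOURCE B (Python) =====
-- from typing import Dict, List, Tuple
--
-- def genereer_stappenplan(alle_feedback: List[str]) -> List[str]:
--     """Genereer actiestappen op basis van feedback (single pass: flags first, then emit)."""
--     mist = meth = apa = ailog = aisig = refl = kop = zand = obj = figtab = False
--     for f in alle_feedback:
--         fl = f.lower()
--         mist = mist or "mist" in f
--         meth = meth or "methodologie mist" in f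
--         apa = apa or "APA" in f
--         ailog = ailog or "AI-logboek" in f or "transparantie" in f
--         aisig = aisig or "AI-signaal" in f
--         refl = refl or "reflectie op AI" in f
--         kop = kop or "Kop" in f
--         zand = zand or "zandlopermodel" in fl
--         obj = obj or "objectief" in fl
--         figtab = figtab or "figuur" in fl or "tabel" in fl
--     stappen = []
--     if mist:
--         stappen.append("📌 Stap 1: Voeg ontbrekende elementen toe aan titelblad")
--     if meth:
--         stappen.append("📌 Stap 2: Beschrijf onderzoeksdesign, steekproef, instrument, procedure en analyse")
--     if apa:
--         stappen.append("📌 Stap 3: Formatteer referenties volgens APA 7e editie (Poelmans & Severijnen, 2022)")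
--     if ailog:
--         stappen.append("📌 Stap 4: Lever AI-logboek aan volgens REBO template (verplicht!)")
--         stappen.append("   - Gebruik template in 'examples/ai_logboek_voorbeeld.txt'")
--     if aisig:
--         stappen.append("📌 Stap 5: Herschrijf passages in eigen woorden en voeg persoonlijke reflectie toe")
--     if refl:
--         stappen.append("📌 Stap 6: Voeg reflectie op AI-gebruik toe in discussie/conclusie (VUB 2023 beveelt aan)")
--     if kop:
--         stappen.append("📌 Stap 7: Controleer kopstijlen (Kop 1 voor hoofdstukken, Kop 2 voor paragrafen)")
--     if zand:
--         stappen.append("📌 Stap 8: Pas het zandlopermodel toe - inleiding van breed naar specifiek")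
--     if obj:
--         stappen.append("📌 Stap 9: Vermijd waardeoordelen en subjectieve kwalificaties")
--     if figtab:
--         stappen.append("📌 Stap 10: Controleer of alle figuren/tabellen een bijschrift/bovenschrift hebben")
--     return stappen or ["✅ Geen correcties nodig. Volgende stap: indienen voor eindbeoordeling."]
-- ===== Notes on version B (the rewrite author's own statement) =====
-- stated objective: faster
-- what changed: Replaces ten separate any(...) scans of the feedback list (with repeated lowercasing) by a single pass that accumulates ten boolean flags, lowercasing each item once, followed by a flag-driven emission of the step strings.
import Mathlib
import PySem

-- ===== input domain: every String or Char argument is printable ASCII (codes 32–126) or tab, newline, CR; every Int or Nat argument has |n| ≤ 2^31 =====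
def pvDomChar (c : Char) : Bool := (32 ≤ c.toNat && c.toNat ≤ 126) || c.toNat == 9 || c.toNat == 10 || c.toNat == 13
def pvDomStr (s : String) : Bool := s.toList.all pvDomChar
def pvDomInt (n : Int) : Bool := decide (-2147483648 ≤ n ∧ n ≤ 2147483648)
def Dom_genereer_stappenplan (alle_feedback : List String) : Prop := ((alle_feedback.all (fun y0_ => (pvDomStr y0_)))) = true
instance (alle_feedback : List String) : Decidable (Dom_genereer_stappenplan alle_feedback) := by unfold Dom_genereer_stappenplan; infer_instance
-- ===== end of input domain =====

-- B computes all ten substring flags in one pass over the feedback list (lowercasing each item once), then emits the steps; same output, one traversal instead of ten (objective: faster, measured).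


-- ===== PORT A =====
def genereer_stappenplan (alle_feedback : List String) : List String :=
  let stappen : List String := []
  let stappen := if alle_feedback.any (fun f => PySem.Str.isIn "mist" f) then
      stappen ++ ["📌 Stap 1: Voeg ontbrekende elementen toe aan titelblad"] else stappen
  let stappen := if alle_feedback.any (fun f => PySem.Str.isIn "methodologie mist" f) then
      stappen ++ ["📌 Stap 2: Beschrijf onderzoeksdesign, steekproef, instrument, procedure en analyse"] else stappen
  let stappen := if alle_feedback.any (fun f => PySem.Str.isIn "APA" f) then
      stappen ++ ["📌 Stap 3: Formatteer referenties volgens APA 7e editie (Poelmans & Severijnen, 2022)"] else stappen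
  let stappen := if alle_feedback.any (fun f => PySem.Str.isIn "AI-logboek" f || PySem.Str.isIn "transparantie" f) then
      stappen ++ ["📌 Stap 4: Lever AI-logboek aan volgens REBO template (verplicht!)",
                  "   - Gebruik template in 'examples/ai_logboek_voorbeeld.txt'"] else stappen
  let stappen := if alle_feedback.any (fun f => PySem.Str.isIn "AI-signaal" f) then
      stappen ++ ["📌 Stap 5: Herschrijf passages in eigen woorden en voeg persoonlijke reflectie toe"] else stappen
  let stappen := if alle_feedback.any (fun f => PySem.Str.isIn "reflectie op AI" f) then
      stappen ++ ["📌 Stap 6: Voeg reflectie op AI-gebruik toe in discussie/conclusie (VUB 2023 beveelt aan)"] else stappen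
  let stappen := if alle_feedback.any (fun f => PySem.Str.isIn "Kop" f) then
      stappen ++ ["📌 Stap 7: Controleer kopstijlen (Kop 1 voor hoofdstukken, Kop 2 voor paragrafen)"] else stappen
  let stappen := if alle_feedback.any (fun f => PySem.Str.isIn "zandlopermodel" (PySem.Str.lower f)) then
      stappen ++ ["📌 Stap 8: Pas het zandlopermodel toe - inleiding van breed naar specifiek"] else stappen
  let stappen := if alle_feedback.any (fun f => PySem.Str.isIn "objectief" (PySem.Str.lower f)) then
      stappen ++ ["📌 Stap 9: Vermijd waardeoordelen en subjectieve kwalificaties"] else stappen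
  let stappen := if alle_feedback.any (fun f => PySem.Str.isIn "figuur" (PySem.Str.lower f) || PySem.Str.isIn "tabel" (PySem.Str.lower f)) then
      stappen ++ ["📌 Stap 10: Controleer of alle figuren/tabellen een bijschrift/bovenschrift hebben"] else stappen
  if stappen = [] then ["✅ Geen correcties nodig. Volgende stap: indienen voor eindbeoordeling."] else stappen

-- ===== PORT B =====
structure PvFlags where
  mist : Bool
  meth : Bool
  apa : Bool
  ailog : Bool
  aisig : Bool
  refl : Bool
  kop : Bool
  zand : Bool
  obj : Bool
  figtab : Bool
deriving DecidableEq, Repr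

def pvFlagStep (acc : PvFlags) (f : String) : PvFlags :=
  let fl := PySem.Str.lower f
  { mist := acc.mist || PySem.Str.isIn "mist" f
    meth := acc.meth || PySem.Str.isIn "methodologie mist" f
    apa := acc.apa || PySem.Str.isIn "APA" f
    ailog := acc.ailog || PySem.Str.isIn "AI-logboek" f || PySem.Str.isIn "transparantie" f
    aisig := acc.aisig || PySem.Str.isIn "AI-signaal" f
    refl := acc.refl || PySem.Str.isIn "reflectie op AI" f
    kop := acc.kop || PySem.Str.isIn "Kop" f
    zand := acc.zand || PySem.Str.isIn "zandlopermodel" fl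
    obj := acc.obj || PySem.Str.isIn "objectief" fl
    figtab := acc.figtab || PySem.Str.isIn "figuur" fl || PySem.Str.isIn "tabel" fl }

def genereer_stappenplan_alt (alle_feedback : List String) : List String :=
  let fl := alle_feedback.foldl pvFlagStep ⟨false, false, false, false, false, false, false, false, false, false⟩
  let stappen : List String :=
    (if fl.mist then ["📌 Stap 1: Voeg ontbrekende elementen toe aan titelblad"] else []) ++
    (if fl.meth then ["📌 Stap 2: Beschrijf onderzoeksdesign, steekproef, instrument, procedure en analyse"] else []) ++
    (if fl.apa then ["📌 Stap 3: Formatteer referenties volgens APA 7e editie (Poelmans & Severijnen, 2022)"] else []) ++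
    (if fl.ailog then ["📌 Stap 4: Lever AI-logboek aan volgens REBO template (verplicht!)",
                       "   - Gebruik template in 'examples/ai_logboek_voorbeeld.txt'"] else []) ++
    (if fl.aisig then ["📌 Stap 5: Herschrijf passages in eigen woorden en voeg persoonlijke reflectie toe"] else []) ++
    (if fl.refl then ["📌 Stap 6: Voeg reflectie op AI-gebruik toe in discussie/conclusie (VUB 2023 beveelt aan)"] else []) ++
    (if fl.kop then ["📌 Stap 7: Controleer kopstijlen (Kop 1 voor hoofdstukken, Kop 2 voor paragrafen)"] else []) ++
    (if fl.zand then ["📌 Stap 8: Pas het zandlopermodel toe - inleiding van breed naar specifiek"] else []) ++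
    (if fl.obj then ["📌 Stap 9: Vermijd waardeoordelen en subjectieve kwalificaties"] else []) ++
    (if fl.figtab then ["📌 Stap 10: Controleer of alle figuren/tabellen een bijschrift/bovenschrift hebben"] else [])
  if stappen = [] then ["✅ Geen correcties nodig. Volgende stap: indienen voor eindbeoordeling."] else stappen

-- ===== PRECONDITION & SPEC =====
def Spec_genereer_stappenplan (alle_feedback : List String) (out : List String) : Prop := out = genereer_stappenplan_alt alle_feedback
instance (alle_feedback : List String) (out : List String) : Decidable (Spec_genereer_stappenplan alle_feedback out) := by unfold Spec_genereer_stappenplan; infer_instance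

-- ===== CLAIM (what is proved, stated in full; the proofs are below) =====
def Claim_equal_genereer_stappenplan : Prop := ∀ (alle_feedback : List String), Dom_genereer_stappenplan alle_feedback → Spec_genereer_stappenplan alle_feedback (genereer_stappenplan alle_feedback)

-- ===== LEMMAS AND PROOFS =====

-- the flag fold computes, component-wise, "initial flag OR any of the per-item tests"
theorem pvFlagStep_foldl (l : List String) (acc : PvFlags) :
    l.foldl pvFlagStep acc =
      { mist := acc.mist || l.any (fun f => PySem.Str.isIn "mist" f)
        meth := acc.meth || l.any (fun f => PySem.Str.isIn "methodologie mist" f)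
        apa := acc.apa || l.any (fun f => PySem.Str.isIn "APA" f)
        ailog := acc.ailog || l.any (fun f => PySem.Str.isIn "AI-logboek" f || PySem.Str.isIn "transparantie" f)
        aisig := acc.aisig || l.any (fun f => PySem.Str.isIn "AI-signaal" f)
        refl := acc.refl || l.any (fun f => PySem.Str.isIn "reflectie op AI" f)
        kop := acc.kop || l.any (fun f => PySem.Str.isIn "Kop" f)
        zand := acc.zand || l.any (fun f => PySem.Str.isIn "zandlopermodel" (PySem.Str.lower f))
        obj := acc.obj || l.any (fun f => PySem.Str.isIn "objectief" (PySem.Str.lower f))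
        figtab := acc.figtab || l.any (fun f => PySem.Str.isIn "figuur" (PySem.Str.lower f) || PySem.Str.isIn "tabel" (PySem.Str.lower f)) } := by
  induction l generalizing acc with
  | nil => simp
  | cons x xs ih =>
      simp only [List.foldl_cons, ih, List.any_cons]
      simp [pvFlagStep, Bool.or_assoc]

-- "conditionally append one block" written as "append a conditional block"
theorem pv_if_append (acc block : List String) (c : Bool) :
    (if c then acc ++ block else acc) = acc ++ (if c then block else []) := by
  cases c <;> simp

theorem genereer_stappenplan_eq_alt (alle_feedback : List String) :
    genereer_stappenplan alle_feedback = genereer_stappenplan_alt alle_feedback := by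
  unfold genereer_stappenplan genereer_stappenplan_alt
  rw [pvFlagStep_foldl]
  simp only [Bool.false_or]
  rw [pv_if_append, pv_if_append, pv_if_append, pv_if_append, pv_if_append,
      pv_if_append, pv_if_append, pv_if_append, pv_if_append, pv_if_append]
  simp only [List.nil_append, List.append_assoc]

-- ===== VERDICT (by name: the statement is the Claim_ definition above) =====
theorem genereer_stappenplan_spec : Claim_equal_genereer_stappenplan := by
  intro alle_feedback _
  exact genereer_stappenplan_eq_alt alle_feedback
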